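-- pv_equiv track=rewrite | github.com/debdattasarkar/DSA | 2. GFG/0. All/6. Algorithms Mathematical/(M) Minimum Operations to Connect Hospitals/py_sol.py | minConnect
-- ===== SOURCE A (Python) =====
-- def minConnect(V, edges):
--     """
--     Minimum operations to connect all hospitals into a single component,
--     given that we can remove any existing edge and reconnect it elsewhere.
--
--     Approach (Union-Find / Disjoint Set):
--     -------------------------------------
--     - Treat each hospital as a node in an undirected graph.
--     - As we add edges:
--         * If edge connects two DIFFERENT components => we UNION them.
--         * If edge connects two nodes in the SAME component => it's REDUNDANT.
--     - After processing all edges: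
--         components = number of DSU roots
--         redundant = count of redundant edges
--     - To connect `components` components, we need `components - 1` edges.
--     - If `redundant >= components - 1`:
--           return components - 1
--       else:
--           return -1
--
--     Time Complexity:
--         - DSU 'find'/'union' with path compression + union-by-size:
--           ~ O(α(V)) per operation (α = inverse Ackermann, almost constant).
--         - We process E edges => O((V + E) * α(V)) ≈ O(V + E).
--     Space Complexity:
--         - parent + size arrays: O(V).
--     """
--
--     # ---------- Disjoint Set / Union-Find implementation ----------
--     parent = list(range(V))
--     size = [1] * V     # or rank, both fine
--
--     def find(x: int) -> int:
--         """
--         Find with path compression.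
--         Amortized time ~ O(α(V)).
--         """
--         if parent[x] != x:
--             parent[x] = find(parent[x])
--         return parent[x]
--
--     def union(x: int, y: int) -> bool:
--         """
--         Union by size.
--         Returns True if a merge happened (distinct components),
--         False if x and y were already in the same component.
--         """
--         root_x = find(x)
--         root_y = find(y)
--         if root_x == root_y:
--             return False  # no merge; edge is redundant
--
--         # Attach smaller tree under larger
--         if size[root_x] < size[root_y]:
--             root_x, root_y = root_y, root_x
--         parent[root_y] = root_x
--         size[root_x] += size[root_y]
--         return True
--
--     # Initially each node is its own component
--     components = V
--     redundant = 0
--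
--     # Process all edges
--     # Time: O(E * α(V)) ~ O(E)
--     for u, v in edges:
--         if union(u, v):
--             # merged two components → one less component now
--             components -= 1
--         else:
--             # Did not merge → edge is inside same component => redundant
--             redundant += 1
--
--     # Need (components - 1) edges to connect all components
--     required = components - 1
--
--     # If we have enough redundant edges, we can rewire them
--     if redundant >= required:
--         return required
--     else:
--         return -1
-- ===== SOURCE B (Python) =====
-- def minConnect(V, edges):
--     # Eager label-merging instead of a union-find forest: every node carries its
--     # component label directly; a merging edge relabels the smaller component wholesale.
--     label = list(range(V))
--     components = V
--     redundant = 0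
--     for u, v in edges:
--         lu, lv = label[u], label[v]
--         if lu == lv:
--             redundant += 1
--         else:
--             label = [lu if t == lv else t for t in label]
--             components -= 1
--     required = components - 1
--     return required if redundant >= required else -1
-- ===== Notes on version B (the rewrite author's own statement) =====
-- stated objective: alternative
-- what changed: Replaces the union-find forest (recursive find with path compression, union by size) by eager label merging: each node stores its component label directly, a redundant edge is detected by comparing two labels, and a merging edge rewrites every occurrence of one label in a single pass, so there are no trees, no recursion and no size array.
import Mathlib
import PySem

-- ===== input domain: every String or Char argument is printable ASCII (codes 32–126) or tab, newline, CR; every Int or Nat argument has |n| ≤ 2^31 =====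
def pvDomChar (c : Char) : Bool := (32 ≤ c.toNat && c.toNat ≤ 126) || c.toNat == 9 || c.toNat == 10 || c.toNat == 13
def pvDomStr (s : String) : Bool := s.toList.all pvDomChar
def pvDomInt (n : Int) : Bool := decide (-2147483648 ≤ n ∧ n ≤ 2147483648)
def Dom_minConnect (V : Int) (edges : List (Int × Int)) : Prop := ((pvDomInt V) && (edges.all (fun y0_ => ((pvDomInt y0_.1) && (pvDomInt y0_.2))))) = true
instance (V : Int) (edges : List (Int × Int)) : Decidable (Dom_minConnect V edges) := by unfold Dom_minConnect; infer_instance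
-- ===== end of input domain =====

-- A keeps a union-find forest; B replaces it by eager label merging (objective: alternative
-- algorithm of similar size). Only the return value is compared (neither version mutates arguments).

-- ===== PORT A =====
-- `if parent[x] != x: parent[x] = find(parent[x]); return parent[x]` — the recursion is made total
-- by a fuel argument; fuel = V suffices because parent chains never revisit a node.
def pvFind : Nat → List Int → Int → List Int × Int
  | 0, p, x => (p, x)
  | k+1, p, x =>
    let px := (PySem.List.pyGet? p x).getD 0
    if px = x then (p, x)
    else
      let pr := pvFind k p px
      (PySem.List.pySetD pr.1 x pr.2, pr.2)

def pvUnion (fuel : Nat) (p s : List Int) (x y : Int) : List Int × List Int × Bool :=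
  let f1 := pvFind fuel p x
  let f2 := pvFind fuel f1.1 y
  if f1.2 = f2.2 then (f2.1, s, false)
  else
    let sx := (PySem.List.pyGet? s f1.2).getD 0
    let sy := (PySem.List.pyGet? s f2.2).getD 0
    let rr := if sx < sy then (f2.2, f1.2) else (f1.2, f2.2)
    (PySem.List.pySetD f2.1 rr.2 rr.1,
     PySem.List.pySetD s rr.1 ((PySem.List.pyGet? s rr.1).getD 0 + (PySem.List.pyGet? s rr.2).getD 0),
     true)

def pvStepA (fuel : Nat) (st : List Int × List Int × Int × Int) (e : Int × Int) :
    List Int × List Int × Int × Int :=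
  let r := pvUnion fuel st.1 st.2.1 e.1 e.2
  if r.2.2 then (r.1, r.2.1, st.2.2.1 - 1, st.2.2.2) else (r.1, r.2.1, st.2.2.1, st.2.2.2 + 1)

def minConnect (V : Int) (edges : List (Int × Int)) : Int :=
  let st := edges.foldl (pvStepA V.toNat)
    (PySem.List.pyRange 0 V 1, List.replicate V.toNat (1 : Int), V, 0)
  let required := st.2.2.1 - 1
  if st.2.2.2 ≥ required then required else -1

-- ===== PORT B =====
def pvStepB (st : List Int × Int × Int) (e : Int × Int) : List Int × Int × Int :=
  let lu := (PySem.List.pyGet? st.1 e.1).getD 0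
  let lv := (PySem.List.pyGet? st.1 e.2).getD 0
  if lu = lv then (st.1, st.2.1, st.2.2 + 1)
  else (st.1.map (fun t => if t = lv then lu else t), st.2.1 - 1, st.2.2)

def minConnect_alt (V : Int) (edges : List (Int × Int)) : Int :=
  let st := edges.foldl pvStepB (PySem.List.pyRange 0 V 1, V, 0)
  let required := st.2.1 - 1
  if st.2.2 ≥ required then required else -1

-- ===== PRECONDITION & SPEC =====
-- Pre_ excludes exactly the inputs where Python A raises IndexError: an edge endpoint outside
-- [-V, V) (Python list indexing accepts negative indices down to -V).
def Pre_minConnect (V : Int) (edges : List (Int × Int)) : Prop :=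
  ∀ e ∈ edges, -V ≤ e.1 ∧ e.1 < V ∧ -V ≤ e.2 ∧ e.2 < V
instance (V : Int) (edges : List (Int × Int)) : Decidable (Pre_minConnect V edges) := by
  unfold Pre_minConnect; infer_instance

def pvWitness_minConnect : Int × (List (Int × Int)) := (4, [(0, 1), (1, 2), (0, -1), (2, 0)])

def Spec_minConnect (V : Int) (edges : List (Int × Int)) (out : Int) : Prop := out = minConnect_alt V edges
instance (V : Int) (edges : List (Int × Int)) (out : Int) : Decidable (Spec_minConnect V edges out) := by unfold Spec_minConnect; infer_instance

-- ===== CLAIM (what is proved, stated in full; the proofs are below) =====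
def Claim_equal_minConnect : Prop := ∀ (V : Int) (edges : List (Int × Int)), Dom_minConnect V edges → Pre_minConnect V edges → Spec_minConnect V edges (minConnect V edges)

-- ===== LEMMAS AND PROOFS =====

-- list read with an Int index already known to be in [0, len)
def pvIdx (l : List Int) (x : Int) : Int := l.getD x.toNat 0
def pvInR (n : Nat) (x : Int) : Prop := 0 ≤ x ∧ x < (n : Int)
def pvWrap (n : Nat) (x : Int) : Int := if x < 0 then x + n else x

-- the pure root of x in parent forest p (fuel-indexed chain walk)
def pvRootF : Nat → List Int → Int → Int
  | 0, _, x => x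
  | k+1, p, x => if pvIdx p x = x then x else pvRootF k p (pvIdx p x)

def pvRoot (p : List Int) (x : Int) : Int := pvRootF p.length p x

-- forest invariant: parents in range, sizes ≥ 1, size strictly increases along parent edges
def pvInvA (p s : List Int) : Prop :=
  s.length = p.length ∧
  ∀ x : Int, pvInR p.length x →
    pvInR p.length (pvIdx p x) ∧ 1 ≤ pvIdx s x ∧ (pvIdx p x = x ∨ pvIdx s x < pvIdx s (pvIdx p x))

-- termination measure: how many cells hold a size ≥ size[x]
def pvMu (s : List Int) (x : Int) : Nat :=
  ((Finset.range s.length).filter (fun i : ℕ => pvIdx s x ≤ pvIdx s (i : Int))).card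

lemma pvInR_of_eq {n m : Nat} (h : m = n) {x : Int} (hx : pvInR n x) : pvInR m x := by
  rw [h]; exact hx

lemma pvIdx_toNatCast (s : List Int) (x : Int) : pvIdx s ((x.toNat : Nat) : Int) = pvIdx s x := by
  have h : ((x.toNat : Nat) : Int).toNat = x.toNat := by omega
  unfold pvIdx
  rw [h]

lemma pvMu_le (s : List Int) (x : Int) : pvMu s x ≤ s.length := by
  classical
  calc pvMu s x ≤ (Finset.range s.length).card := Finset.card_filter_le _ _
  _ = s.length := Finset.card_range _

lemma pvMu_pos (s : List Int) (x : Int) (h : pvInR s.length x) : 0 < pvMu s x := by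
  classical
  obtain ⟨h0, h1⟩ := h
  apply Finset.card_pos.2
  refine ⟨x.toNat, Finset.mem_filter.2 ⟨Finset.mem_range.2 (by omega), ?_⟩⟩
  rw [pvIdx_toNatCast]

lemma pvMu_lt (p s : List Int) (x : Int) (hInv : pvInvA p s) (hx : pvInR p.length x)
    (hnr : pvIdx p x ≠ x) : pvMu s (pvIdx p x) < pvMu s x := by
  classical
  obtain ⟨hsl, hI⟩ := hInv
  obtain ⟨hpR, hs1, hdec⟩ := hI x hx
  have hlt : pvIdx s x < pvIdx s (pvIdx p x) := by
    rcases hdec with h | h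
    · exact absurd h hnr
    · exact h
  apply Finset.card_lt_card
  constructor
  · intro i hi
    rw [Finset.mem_filter] at hi ⊢
    exact ⟨hi.1, le_trans (le_of_lt hlt) hi.2⟩
  · intro hsub
    obtain ⟨hx0, hx1⟩ := hx
    have hmem : x.toNat ∈ (Finset.range s.length).filter
        (fun i : ℕ => pvIdx s x ≤ pvIdx s (i : Int)) := by
      refine Finset.mem_filter.2 ⟨Finset.mem_range.2 (by omega), ?_⟩
      rw [pvIdx_toNatCast]
    have h2 := (Finset.mem_filter.1 (hsub hmem)).2
    rw [pvIdx_toNatCast] at h2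
    omega

lemma pvRootF_fix (p : List Int) (x : Int) (h : pvIdx p x = x) :
    ∀ k, pvRootF k p x = x := by
  intro k
  cases k with
  | zero => rfl
  | succ k => simp [pvRootF, h]

lemma pvRootF_props : ∀ (k : Nat) (p s : List Int) (x : Int), pvInvA p s → pvInR p.length x →
    pvMu s x ≤ k →
    pvInR p.length (pvRootF k p x) ∧ pvIdx p (pvRootF k p x) = pvRootF k p x ∧
      pvIdx s x ≤ pvIdx s (pvRootF k p x) := by
  intro k
  induction k with
  | zero =>
    intro p s x hInv hx hmu
    have := pvMu_pos s x (pvInR_of_eq hInv.1 hx)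
    omega
  | succ k ih =>
    intro p s x hInv hx hmu
    by_cases hroot : pvIdx p x = x
    · have e : pvRootF (k+1) p x = x := by simp [pvRootF, hroot]
      rw [e]
      exact ⟨hx, hroot, le_refl _⟩
    · have hstep : pvRootF (k+1) p x = pvRootF k p (pvIdx p x) := by simp [pvRootF, hroot]
      obtain ⟨hpR, hs1, hdec⟩ := hInv.2 x hx
      have hlt : pvIdx s x < pvIdx s (pvIdx p x) := by
        rcases hdec with h | h
        · exact absurd h hroot
        · exact h
      have hmu' : pvMu s (pvIdx p x) ≤ k := by
        have := pvMu_lt p s x hInv hx hroot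
        omega
      obtain ⟨a, b, c⟩ := ih p s (pvIdx p x) hInv hpR hmu'
      rw [hstep]
      exact ⟨a, b, by omega⟩

lemma pvRootF_eq : ∀ (k : Nat) (k' : Nat) (p s : List Int) (x : Int), pvInvA p s →
    pvInR p.length x → pvMu s x ≤ k → pvMu s x ≤ k' → pvRootF k p x = pvRootF k' p x := by
  intro k
  induction k with
  | zero =>
    intro k' p s x hInv hx hmu _
    have := pvMu_pos s x (pvInR_of_eq hInv.1 hx)
    omega
  | succ k ih =>
    intro k' p s x hInv hx hmu hmu'
    by_cases hroot : pvIdx p x = x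
    · rw [pvRootF_fix p x hroot, pvRootF_fix p x hroot]
    · cases k' with
      | zero =>
        have := pvMu_pos s x (pvInR_of_eq hInv.1 hx)
        omega
      | succ k' =>
        have hstep : pvRootF (k+1) p x = pvRootF k p (pvIdx p x) := by simp [pvRootF, hroot]
        have hstep' : pvRootF (k'+1) p x = pvRootF k' p (pvIdx p x) := by simp [pvRootF, hroot]
        obtain ⟨hpR, _, _⟩ := hInv.2 x hx
        have h1 := pvMu_lt p s x hInv hx hroot
        rw [hstep, hstep']
        exact ih k' p s (pvIdx p x) hInv hpR (by omega) (by omega)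

lemma pvMu_le_len (p s : List Int) (hInv : pvInvA p s) (x : Int) : pvMu s x ≤ p.length := by
  have := pvMu_le s x
  rw [hInv.1] at this
  exact this

lemma pvRoot_props (p s : List Int) (x : Int) (hInv : pvInvA p s) (hx : pvInR p.length x) :
    pvInR p.length (pvRoot p x) ∧ pvIdx p (pvRoot p x) = pvRoot p x ∧
      pvIdx s x ≤ pvIdx s (pvRoot p x) :=
  pvRootF_props p.length p s x hInv hx (pvMu_le_len p s hInv x)

lemma pvRoot_root (p : List Int) (x : Int) (h : pvIdx p x = x) : pvRoot p x = x :=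
  pvRootF_fix p x h _

lemma pvRoot_unfold (p s : List Int) (x : Int) (hInv : pvInvA p s) (hx : pvInR p.length x)
    (hnr : pvIdx p x ≠ x) : pvRoot p x = pvRoot p (pvIdx p x) := by
  obtain ⟨n, hn⟩ : ∃ n, p.length = n + 1 := ⟨p.length - 1, by obtain ⟨h0, h1⟩ := hx; omega⟩
  obtain ⟨hpR, _, _⟩ := hInv.2 x hx
  have h1 := pvMu_lt p s x hInv hx hnr
  have h2 := pvMu_le_len p s hInv x
  have key : pvRootF (n+1) p x = pvRootF n p (pvIdx p x) := by
    have e : pvRootF (n+1) p x = if pvIdx p x = x then x else pvRootF n p (pvIdx p x) := rfl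
    rw [e, if_neg hnr]
  unfold pvRoot
  conv_lhs => rw [hn]
  rw [key]
  exact pvRootF_eq n p.length p s (pvIdx p x) hInv hpR (by omega) (pvMu_le_len p s hInv _)

-- ----- bridges between PySem primitives and pvIdx/List.set -----

lemma pvGet_pos (l : List Int) (x : Int) (h0 : 0 ≤ x) (h1 : x < (l.length : Int)) :
    (PySem.List.pyGet? l x).getD 0 = pvIdx l x := by
  simp only [PySem.List.pyGet?, PySem.List.pyIdx?, if_pos h0, if_pos h1]
  have hx : x.toNat < l.length := by omega
  simp [pvIdx, List.getD_eq_getElem?_getD, List.getElem?_eq_getElem hx]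

lemma pvGet_neg (l : List Int) (x : Int) (h0 : -(l.length : Int) ≤ x) (h1 : x < 0) :
    (PySem.List.pyGet? l x).getD 0 = pvIdx l (x + l.length) := by
  simp only [PySem.List.pyGet?, PySem.List.pyIdx?, if_neg (by omega : ¬ (0 ≤ x)), if_pos h0]
  have hk : l.length - (-x).toNat = (x + l.length).toNat := by omega
  have hx : (x + (l.length : Int)).toNat < l.length := by omega
  rw [hk]
  simp [pvIdx, List.getD_eq_getElem?_getD, List.getElem?_eq_getElem hx]

lemma pvSet_pos (l : List Int) (x v : Int) (h0 : 0 ≤ x) (h1 : x < (l.length : Int)) :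
    PySem.List.pySetD l x v = l.set x.toNat v := by
  simp [PySem.List.pySetD, PySem.List.pySet?, PySem.List.pyIdx?, h0, h1]

lemma pvSet_neg (l : List Int) (x v : Int) (h0 : -(l.length : Int) ≤ x) (h1 : x < 0) :
    PySem.List.pySetD l x v = l.set (x + l.length).toNat v := by
  simp only [PySem.List.pySetD, PySem.List.pySet?, PySem.List.pyIdx?,
    if_neg (by omega : ¬ (0 ≤ x)), if_pos h0]
  have hk : l.length - (-x).toNat = (x + l.length).toNat := by omega
  rw [hk]
  rfl

lemma pvIdx_set (l : List Int) (i v y : Int) (hi : pvInR l.length i) (hy : 0 ≤ y) :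
    pvIdx (l.set i.toNat v) y = if y = i then v else pvIdx l y := by
  obtain ⟨hi0, hi1⟩ := hi
  by_cases h : y = i
  · subst h
    have hlt : y.toNat < l.length := by omega
    simp [pvIdx, List.getD_eq_getElem?_getD, List.getElem?_set, hlt]
  · have hne : i.toNat ≠ y.toNat := by omega
    simp [pvIdx, List.getD_eq_getElem?_getD, List.getElem?_set, hne, h]

lemma pvSet_self (l : List Int) (i : Int) (hi : pvInR l.length i) :
    l.set i.toNat (pvIdx l i) = l := by
  obtain ⟨hi0, hi1⟩ := hi
  apply List.ext_getElem
  · simp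
  · intro k hk hk'
    simp only [List.getElem_set]
    split_ifs with h
    · subst h
      have hlt : i.toNat < l.length := by omega
      simp [pvIdx, List.getD_eq_getElem?_getD, List.getElem?_eq_getElem hlt]
    · rfl

-- ----- the path-compression write preserves the invariant and all roots -----

lemma pvSet_preserve (p s : List Int) (x r : Int) (hInv : pvInvA p s) (hx : pvInR p.length x)
    (hrR : pvInR p.length r) (hr : pvIdx p r = r) (hRx : pvRoot p x = r)
    (hs : pvIdx s x < pvIdx s r) :
    pvInvA (p.set x.toNat r) s ∧
      ∀ y, pvInR p.length y → pvRoot (p.set x.toNat r) y = pvRoot p y := by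
  have hlen : (p.set x.toNat r).length = p.length := by simp
  have hidx : ∀ y : Int, 0 ≤ y → pvIdx (p.set x.toNat r) y = if y = x then r else pvIdx p y :=
    fun y hy => pvIdx_set p x r y hx hy
  have hxr : x ≠ r := by
    intro h
    rw [h] at hs
    omega
  have hInv' : pvInvA (p.set x.toNat r) s := by
    constructor
    · rw [hlen]; exact hInv.1
    · intro y hy
      rw [hlen] at hy
      rw [hidx y hy.1]
      by_cases h : y = x
      · subst h
        rw [if_pos rfl]
        refine ⟨pvInR_of_eq hlen hrR, (hInv.2 y hy).2.1, Or.inr hs⟩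
      · rw [if_neg h]
        obtain ⟨a, b, c⟩ := hInv.2 y hy
        exact ⟨pvInR_of_eq hlen a, b, c⟩
  refine ⟨hInv', ?_⟩
  have main : ∀ (m : Nat) (y : Int), pvMu s y ≤ m → pvInR p.length y →
      pvRoot (p.set x.toNat r) y = pvRoot p y := by
    intro m
    induction m with
    | zero =>
      intro y hmu hy
      have := pvMu_pos s y (pvInR_of_eq hInv.1 hy)
      omega
    | succ m ih =>
      intro y hmu hy
      by_cases hyx : y = x
      · subst hyx
        have h1 : pvIdx (p.set y.toNat r) y = r := by rw [hidx y hy.1, if_pos rfl]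
        have hnr' : pvIdx (p.set y.toNat r) y ≠ y := by rw [h1]; exact fun h => hxr h.symm
        have e := pvRoot_unfold (p.set y.toNat r) s y hInv' (pvInR_of_eq hlen hy) hnr'
        rw [e, h1]
        have hrroot' : pvIdx (p.set y.toNat r) r = r := by
          rw [hidx r hrR.1, if_neg (fun h => hxr h.symm), hr]
        rw [pvRoot_root _ _ hrroot', ← hRx]
      · have hidy : pvIdx (p.set x.toNat r) y = pvIdx p y := by
          rw [hidx y hy.1, if_neg hyx]
        by_cases hroot : pvIdx p y = y
        · rw [pvRoot_root p y hroot, pvRoot_root _ y (by rw [hidy]; exact hroot)]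
        · obtain ⟨hpR, _, _⟩ := hInv.2 y hy
          have h1 := pvMu_lt p s y hInv hy hroot
          have e1 := pvRoot_unfold p s y hInv hy hroot
          have e2 := pvRoot_unfold (p.set x.toNat r) s y hInv' (pvInR_of_eq hlen hy)
            (by rw [hidy]; exact hroot)
          rw [e2, e1, hidy]
          exact ih (pvIdx p y) (by omega) hpR
  intro y hy
  exact main (pvMu s y) y (le_refl _) hy

-- ----- find: returns the root, preserves the invariant and every root -----

lemma pvFind_root (p : List Int) (x : Int) (h : pvIdx p x = x) (hx : pvInR p.length x) :
    ∀ k, pvFind k p x = (p, x) := by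
  intro k
  cases k with
  | zero => rfl
  | succ k =>
    have e : (PySem.List.pyGet? p x).getD 0 = x := by
      rw [pvGet_pos p x hx.1 hx.2]; exact h
    simp [pvFind, e]

lemma pvFind_spec : ∀ (k : Nat) (p s : List Int) (x : Int), pvInvA p s → pvInR p.length x →
    pvMu s x ≤ k →
    (pvFind k p x).2 = pvRoot p x ∧ (pvFind k p x).1.length = p.length ∧
      pvInvA (pvFind k p x).1 s ∧
      ∀ y, pvInR p.length y → pvRoot (pvFind k p x).1 y = pvRoot p y := by
  intro k
  induction k with
  | zero =>
    intro p s x hInv hx hmu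
    have := pvMu_pos s x (pvInR_of_eq hInv.1 hx)
    omega
  | succ k ih =>
    intro p s x hInv hx hmu
    have hget : (PySem.List.pyGet? p x).getD 0 = pvIdx p x := pvGet_pos p x hx.1 hx.2
    by_cases hroot : pvIdx p x = x
    · have e := pvFind_root p x hroot hx (k+1)
      rw [e]
      exact ⟨(pvRoot_root p x hroot).symm, rfl, hInv, fun y _ => rfl⟩
    · have hstep : pvFind (k+1) p x =
        (PySem.List.pySetD (pvFind k p (pvIdx p x)).1 x (pvFind k p (pvIdx p x)).2,
         (pvFind k p (pvIdx p x)).2) := by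
        simp only [pvFind, hget]
        rw [if_neg hroot]
      obtain ⟨hpR, hs1, hdec⟩ := hInv.2 x hx
      have h1 := pvMu_lt p s x hInv hx hroot
      obtain ⟨ihv, ihlen, ihInv, ihroots⟩ := ih p s (pvIdx p x) hInv hpR (by omega)
      have hrval : (pvFind k p (pvIdx p x)).2 = pvRoot p x := by
        rw [ihv, ← pvRoot_unfold p s x hInv hx hroot]
      have hsetD : PySem.List.pySetD (pvFind k p (pvIdx p x)).1 x (pvFind k p (pvIdx p x)).2 =
          (pvFind k p (pvIdx p x)).1.set x.toNat (pvFind k p (pvIdx p x)).2 :=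
        pvSet_pos _ x _ hx.1 (by rw [ihlen]; exact hx.2)
      have hxp1 : pvInR (pvFind k p (pvIdx p x)).1.length x := pvInR_of_eq ihlen hx
      have hrp : pvInR p.length (pvRoot p x) := (pvRoot_props p s x hInv hx).1
      have hrfix : pvIdx p (pvRoot p x) = pvRoot p x := (pvRoot_props p s x hInv hx).2.1
      have hrp1R : pvInR (pvFind k p (pvIdx p x)).1.length (pvRoot p x) := pvInR_of_eq ihlen hrp
      have hrfix1 : pvIdx (pvFind k p (pvIdx p x)).1 (pvRoot p x) = pvRoot p x := by
        have h0 := ihroots (pvRoot p x) hrp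
        rw [pvRoot_root p _ hrfix] at h0
        obtain ⟨a, b, c⟩ := pvRoot_props (pvFind k p (pvIdx p x)).1 s (pvRoot p x) ihInv hrp1R
        rw [h0] at b
        exact b
      have hRp1x : pvRoot (pvFind k p (pvIdx p x)).1 x = pvRoot p x := ihroots x hx
      have hslt : pvIdx s x < pvIdx s (pvRoot p x) := by
        have h2 : pvIdx s (pvIdx p x) ≤ pvIdx s (pvRoot p (pvIdx p x)) :=
          (pvRoot_props p s (pvIdx p x) hInv hpR).2.2
        rw [← pvRoot_unfold p s x hInv hx hroot] at h2
        rcases hdec with h | h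
        · exact absurd h hroot
        · omega
      obtain ⟨hInv2, hroots2⟩ := pvSet_preserve (pvFind k p (pvIdx p x)).1 s x (pvRoot p x)
        ihInv hxp1 hrp1R hrfix1 (by rw [hRp1x]) hslt
      rw [hstep]
      refine ⟨hrval, ?_, ?_, ?_⟩
      · show (PySem.List.pySetD (pvFind k p (pvIdx p x)).1 x (pvFind k p (pvIdx p x)).2).length =
          p.length
        rw [hsetD]
        simp [ihlen]
      · show pvInvA (PySem.List.pySetD (pvFind k p (pvIdx p x)).1 x (pvFind k p (pvIdx p x)).2) s
        rw [hsetD, hrval]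
        exact hInv2
      · intro y hy
        show pvRoot (PySem.List.pySetD (pvFind k p (pvIdx p x)).1 x (pvFind k p (pvIdx p x)).2) y =
          pvRoot p y
        rw [hsetD, hrval, hroots2 y (pvInR_of_eq ihlen hy)]
        exact ihroots y hy

-- find through a possibly-negative (Python-wrapped) index
lemma pvFind_any (k : Nat) (p s : List Int) (x : Int) (hInv : pvInvA p s)
    (hx : -(p.length : Int) ≤ x ∧ x < (p.length : Int)) (hmu : pvMu s (pvWrap p.length x) ≤ k) :
    (pvFind k p x).2 = pvRoot p (pvWrap p.length x) ∧ (pvFind k p x).1.length = p.length ∧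
      pvInvA (pvFind k p x).1 s ∧
      ∀ y, pvInR p.length y → pvRoot (pvFind k p x).1 y = pvRoot p y := by
  by_cases hneg : x < 0
  · have hw : pvWrap p.length x = x + p.length := by simp [pvWrap, hneg]
    rw [hw] at hmu ⊢
    have hxR : pvInR p.length (x + p.length) := by constructor <;> omega
    have hkpos : 0 < k := by
      have := pvMu_pos s (x + (p.length : Int)) (pvInR_of_eq hInv.1 hxR)
      omega
    obtain ⟨k', rfl⟩ : ∃ k', k = k' + 1 := ⟨k - 1, by omega⟩
    have hget : (PySem.List.pyGet? p x).getD 0 = pvIdx p (x + p.length) := pvGet_neg p x hx.1 hneg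
    have hne : pvIdx p (x + (p.length : Int)) ≠ x := by
      have := ((hInv.2 (x + p.length) hxR).1).1
      omega
    by_cases hroot : pvIdx p (x + (p.length : Int)) = x + p.length
    · have hfr := pvFind_root p (x + p.length) hroot hxR k'
      have hstep : pvFind (k'+1) p x = (PySem.List.pySetD p x (x + p.length), x + p.length) := by
        simp only [pvFind, hget]
        rw [if_neg hne, hroot, hfr]
      have hset : p.set (x + (p.length : Int)).toNat (x + (p.length : Int)) = p := by
        have h2 := pvSet_self p (x + p.length) hxR
        rw [hroot] at h2
        exact h2
      have hsetD : PySem.List.pySetD p x (x + (p.length : Int)) = p := by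
        rw [pvSet_neg p x _ hx.1 hneg, hset]
      rw [hstep, hsetD]
      exact ⟨(pvRoot_root p _ hroot).symm, rfl, hInv, fun y _ => rfl⟩
    · -- x+len is not a root: the recursive call runs on its parent
      have hpx := (hInv.2 (x + p.length) hxR).1
      have hmu' : pvMu s (pvIdx p (x + (p.length : Int))) ≤ k' := by
        have := pvMu_lt p s (x + p.length) hInv hxR hroot
        omega
      obtain ⟨ihv, ihlen, ihInv, ihroots⟩ :=
        pvFind_spec k' p s (pvIdx p (x + p.length)) hInv hpx hmu'
      have hstep : pvFind (k'+1) p x =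
          (PySem.List.pySetD (pvFind k' p (pvIdx p (x + (p.length : Int)))).1 x
            (pvFind k' p (pvIdx p (x + (p.length : Int)))).2,
           (pvFind k' p (pvIdx p (x + (p.length : Int)))).2) := by
        simp only [pvFind, hget]
        rw [if_neg hne]
      have hrval : (pvFind k' p (pvIdx p (x + (p.length : Int)))).2 = pvRoot p (x + p.length) := by
        rw [ihv, ← pvRoot_unfold p s (x + p.length) hInv hxR hroot]
      have hsetD : PySem.List.pySetD (pvFind k' p (pvIdx p (x + (p.length : Int)))).1 x
            (pvFind k' p (pvIdx p (x + (p.length : Int)))).2 =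
          (pvFind k' p (pvIdx p (x + (p.length : Int)))).1.set (x + (p.length : Int)).toNat
            (pvFind k' p (pvIdx p (x + (p.length : Int)))).2 := by
        rw [pvSet_neg _ x _ (by rw [ihlen]; exact hx.1) hneg, ihlen]
      have hxp1 : pvInR (pvFind k' p (pvIdx p (x + (p.length : Int)))).1.length (x + p.length) :=
        pvInR_of_eq ihlen hxR
      have hrp : pvInR p.length (pvRoot p (x + p.length)) :=
        (pvRoot_props p s (x + p.length) hInv hxR).1
      have hrfix : pvIdx p (pvRoot p (x + p.length)) = pvRoot p (x + p.length) :=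
        (pvRoot_props p s (x + p.length) hInv hxR).2.1
      have hrp1R : pvInR (pvFind k' p (pvIdx p (x + (p.length : Int)))).1.length
          (pvRoot p (x + p.length)) := pvInR_of_eq ihlen hrp
      have hrfix1 : pvIdx (pvFind k' p (pvIdx p (x + (p.length : Int)))).1
          (pvRoot p (x + p.length)) = pvRoot p (x + p.length) := by
        have h0 := ihroots (pvRoot p (x + p.length)) hrp
        rw [pvRoot_root p _ hrfix] at h0
        obtain ⟨a, b, c⟩ := pvRoot_props (pvFind k' p (pvIdx p (x + (p.length : Int)))).1 s
          (pvRoot p (x + p.length)) ihInv hrp1R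
        rw [h0] at b
        exact b
      have hRp1x : pvRoot (pvFind k' p (pvIdx p (x + (p.length : Int)))).1 (x + p.length) =
          pvRoot p (x + p.length) := ihroots (x + p.length) hxR
      have hslt : pvIdx s (x + (p.length : Int)) < pvIdx s (pvRoot p (x + p.length)) := by
        obtain ⟨_, _, hdec⟩ := hInv.2 (x + p.length) hxR
        have h2 : pvIdx s (pvIdx p (x + (p.length : Int))) ≤
            pvIdx s (pvRoot p (pvIdx p (x + (p.length : Int)))) :=
          (pvRoot_props p s (pvIdx p (x + p.length)) hInv hpx).2.2
        rw [← pvRoot_unfold p s (x + p.length) hInv hxR hroot] at h2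
        rcases hdec with h | h
        · exact absurd h hroot
        · omega
      obtain ⟨hInv2, hroots2⟩ := pvSet_preserve (pvFind k' p (pvIdx p (x + (p.length : Int)))).1 s
        (x + p.length) (pvRoot p (x + p.length)) ihInv hxp1 hrp1R hrfix1 (by rw [hRp1x]) hslt
      rw [hstep]
      refine ⟨hrval, ?_, ?_, ?_⟩
      · show (PySem.List.pySetD (pvFind k' p (pvIdx p (x + (p.length : Int)))).1 x
            (pvFind k' p (pvIdx p (x + (p.length : Int)))).2).length = p.length
        rw [hsetD]
        simp [ihlen]
      · show pvInvA (PySem.List.pySetD (pvFind k' p (pvIdx p (x + (p.length : Int)))).1 x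
            (pvFind k' p (pvIdx p (x + (p.length : Int)))).2) s
        rw [hsetD, hrval]
        exact hInv2
      · intro y hy
        show pvRoot (PySem.List.pySetD (pvFind k' p (pvIdx p (x + (p.length : Int)))).1 x
            (pvFind k' p (pvIdx p (x + (p.length : Int)))).2) y = pvRoot p y
        rw [hsetD, hrval, hroots2 y (pvInR_of_eq ihlen hy)]
        exact ihroots y hy
  · have hw : pvWrap p.length x = x := by simp [pvWrap, hneg]
    rw [hw] at hmu ⊢
    exact pvFind_spec k p s x hInv ⟨by omega, hx.2⟩ hmu

-- ----- linking two distinct roots -----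

lemma pvLink (p s : List Int) (rx ry : Int) (hInv : pvInvA p s)
    (hrx : pvInR p.length rx) (hry : pvInR p.length ry)
    (hfx : pvIdx p rx = rx) (hfy : pvIdx p ry = ry) (hne : rx ≠ ry)
    (hle : pvIdx s ry ≤ pvIdx s rx) :
    pvInvA (p.set ry.toNat rx) (s.set rx.toNat (pvIdx s rx + pvIdx s ry)) ∧
      ∀ z, pvInR p.length z →
        pvRoot (p.set ry.toNat rx) z = if pvRoot p z = ry then rx else pvRoot p z := by
  have hplen : (p.set ry.toNat rx).length = p.length := by simp
  have hslen : (s.set rx.toNat (pvIdx s rx + pvIdx s ry)).length = s.length := by simp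
  have hsl := hInv.1
  have hrxs : pvInR s.length rx := pvInR_of_eq hsl hrx
  have hidxp : ∀ y : Int, 0 ≤ y → pvIdx (p.set ry.toNat rx) y = if y = ry then rx else pvIdx p y :=
    fun y hy => pvIdx_set p ry rx y hry hy
  have hidxs : ∀ y : Int, 0 ≤ y →
      pvIdx (s.set rx.toNat (pvIdx s rx + pvIdx s ry)) y =
        if y = rx then pvIdx s rx + pvIdx s ry else pvIdx s y :=
    fun y hy => pvIdx_set s rx _ y hrxs hy
  have h1x := (hInv.2 rx hrx).2.1
  have h1y := (hInv.2 ry hry).2.1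
  have hInv' : pvInvA (p.set ry.toNat rx) (s.set rx.toNat (pvIdx s rx + pvIdx s ry)) := by
    constructor
    · rw [hplen, hslen]; exact hsl
    · intro z hz
      rw [hplen] at hz
      obtain ⟨hzp, hz1, hzdec⟩ := hInv.2 z hz
      have hz1' : 1 ≤ pvIdx (s.set rx.toNat (pvIdx s rx + pvIdx s ry)) z := by
        rw [hidxs z hz.1]
        split_ifs with h
        · omega
        · exact hz1
      by_cases hzy : z = ry
      · subst hzy
        rw [hidxp z hz.1, if_pos rfl]
        refine ⟨pvInR_of_eq hplen hrx, hz1', Or.inr ?_⟩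
        rw [hidxs z hz.1, hidxs rx hrx.1, if_pos rfl, if_neg (fun h => hne h.symm)]
        omega
      · rw [hidxp z hz.1, if_neg hzy]
        refine ⟨pvInR_of_eq hplen hzp, hz1', ?_⟩
        rcases hzdec with h | h
        · exact Or.inl h
        · right
          rw [hidxs z hz.1, hidxs (pvIdx p z) hzp.1]
          by_cases e1 : z = rx
          · exfalso
            rw [e1, hfx] at h
            omega
          · rw [if_neg e1]
            by_cases e2 : pvIdx p z = rx
            · rw [if_pos e2]
              rw [e2] at h
              omega
            · rw [if_neg e2]
              exact h
  refine ⟨hInv', ?_⟩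
  have hrootx' : pvIdx (p.set ry.toNat rx) rx = rx := by
    rw [hidxp rx hrx.1, if_neg hne, hfx]
  have main : ∀ (m : Nat) (z : Int),
      pvMu (s.set rx.toNat (pvIdx s rx + pvIdx s ry)) z ≤ m → pvInR p.length z →
      pvRoot (p.set ry.toNat rx) z = if pvRoot p z = ry then rx else pvRoot p z := by
    intro m
    induction m with
    | zero =>
      intro z hmu hz
      have hz' : pvInR (s.set rx.toNat (pvIdx s rx + pvIdx s ry)).length z := by
        rw [hslen, hsl]; exact hz
      have := pvMu_pos _ z hz'
      omega
    | succ m ih =>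
      intro z hmu hz
      by_cases hzy : z = ry
      · have h1 : pvIdx (p.set ry.toNat rx) z = rx := by rw [hidxp z hz.1, if_pos hzy]
        have hnr : pvIdx (p.set ry.toNat rx) z ≠ z := by
          rw [h1]
          intro h
          exact hne (h.trans hzy)
        rw [pvRoot_unfold (p.set ry.toNat rx) (s.set rx.toNat (pvIdx s rx + pvIdx s ry)) z hInv'
          (pvInR_of_eq hplen hz) hnr, h1, pvRoot_root _ rx hrootx']
        have hRz : pvRoot p z = ry := by rw [hzy]; exact pvRoot_root p ry hfy
        rw [hRz, if_pos rfl]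
      · have hidz : pvIdx (p.set ry.toNat rx) z = pvIdx p z := by
          rw [hidxp z hz.1, if_neg hzy]
        by_cases hroot : pvIdx p z = z
        · have hL : pvRoot (p.set ry.toNat rx) z = z :=
            pvRoot_root _ z (by rw [hidz]; exact hroot)
          have hR : pvRoot p z = z := pvRoot_root p z hroot
          rw [hL, hR, if_neg hzy]
        · obtain ⟨hzp, _, _⟩ := hInv.2 z hz
          have e1 := pvRoot_unfold p s z hInv hz hroot
          have e2 := pvRoot_unfold (p.set ry.toNat rx) (s.set rx.toNat (pvIdx s rx + pvIdx s ry)) z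
            hInv' (pvInR_of_eq hplen hz) (by rw [hidz]; exact hroot)
          have hdec' : pvMu (s.set rx.toNat (pvIdx s rx + pvIdx s ry)) (pvIdx p z) <
              pvMu (s.set rx.toNat (pvIdx s rx + pvIdx s ry)) z := by
            have := pvMu_lt (p.set ry.toNat rx) (s.set rx.toNat (pvIdx s rx + pvIdx s ry)) z hInv'
              (pvInR_of_eq hplen hz) (by rw [hidz]; exact hroot)
            rw [hidz] at this
            exact this
          rw [e2, e1, hidz]
          exact ih (pvIdx p z) (by omega) hzp
  intro z hz
  exact main (pvMu (s.set rx.toNat (pvIdx s rx + pvIdx s ry)) z) z (le_refl _) hz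

-- ----- B-side: relabelling -----

lemma pvIdx_map_relabel (l : List Int) (lu lv y : Int) (hy : pvInR l.length y) :
    pvIdx (l.map fun t => if t = lv then lu else t) y =
      if pvIdx l y = lv then lu else pvIdx l y := by
  obtain ⟨h0, h1⟩ := hy
  have hk : y.toNat < l.length := by omega
  simp [pvIdx, List.getD_eq_getElem?_getD, List.getElem?_eq_getElem, hk]

-- collapsing two classes: when the two distinguished values differ, images coincide iff the
-- originals coincide or both lie in the merged pair
lemma pvCollapse (z w a b : Int) (hne : a ≠ b) :
    ((if z = b then a else z) = (if w = b then a else w)) ↔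
      (z = w ∨ ((z = a ∨ z = b) ∧ (w = a ∨ w = b))) := by
  split_ifs with h1 h2 h2 <;> constructor <;> intro h <;> omega

-- propositional skeleton of the class-merge equivalence (abstract atoms keep `tauto` cheap)
lemma pvMergeIff (lz lw lu lv Rz Rw Ru Rv : Int)
    (hzw : lz = lw ↔ Rz = Rw) (hzu : lz = lu ↔ Rz = Ru) (hzv : lz = lv ↔ Rz = Rv)
    (hwu : lw = lu ↔ Rw = Ru) (hwv : lw = lv ↔ Rw = Rv) :
    (lz = lw ∨ (lz = lu ∨ lz = lv) ∧ (lw = lu ∨ lw = lv)) ↔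
      (Rz = Rw ∨ (Rz = Ru ∨ Rz = Rv) ∧ (Rw = Ru ∨ Rw = Rv)) := by
  tauto

lemma pvMergeIff' (lz lw lu lv Rz Rw Ru Rv : Int)
    (hzw : lz = lw ↔ Rz = Rw) (hzu : lz = lu ↔ Rz = Ru) (hzv : lz = lv ↔ Rz = Rv)
    (hwu : lw = lu ↔ Rw = Ru) (hwv : lw = lv ↔ Rw = Rv) :
    (lz = lw ∨ (lz = lu ∨ lz = lv) ∧ (lw = lu ∨ lw = lv)) ↔
      (Rz = Rw ∨ (Rz = Rv ∨ Rz = Ru) ∧ (Rw = Rv ∨ Rw = Ru)) := by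
  tauto

-- combined loop invariant: A's forest and B's labels induce the same partition
def pvRel (p s l : List Int) : Prop :=
  pvInvA p s ∧ l.length = p.length ∧
  ∀ a b : Int, pvInR p.length a → pvInR p.length b →
    (pvIdx l a = pvIdx l b ↔ pvRoot p a = pvRoot p b)

set_option maxHeartbeats 1000000 in
lemma pvStep_rel (fuel : Nat) (p s l : List Int) (c r : Int) (e : Int × Int)
    (hRel : pvRel p s l) (hf : s.length ≤ fuel)
    (he1 : -(p.length : Int) ≤ e.1 ∧ e.1 < (p.length : Int))
    (he2 : -(p.length : Int) ≤ e.2 ∧ e.2 < (p.length : Int)) :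
    ∃ p' s' l' c' r', pvStepA fuel (p, s, c, r) e = (p', s', c', r') ∧
      pvStepB (l, c, r) e = (l', c', r') ∧ p'.length = p.length ∧ s'.length = s.length ∧
      pvRel p' s' l' := by
  obtain ⟨hInv, hllen, hCR⟩ := hRel
  set u := pvWrap p.length e.1 with hu
  set v := pvWrap p.length e.2 with hv
  have huR : pvInR p.length u := by
    rw [hu]; simp only [pvWrap]
    split_ifs <;> constructor <;> omega
  have hvR : pvInR p.length v := by
    rw [hv]; simp only [pvWrap]
    split_ifs <;> constructor <;> omega
  -- A side: the two find calls
  have hmu1 : pvMu s u ≤ fuel := le_trans (pvMu_le s u) hf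
  obtain ⟨f1v, f1len, f1Inv, f1roots⟩ := pvFind_any fuel p s e.1 hInv he1 hmu1
  have hmu2 : pvMu s v ≤ fuel := le_trans (pvMu_le s v) hf
  obtain ⟨f2v, f2len, f2Inv, f2roots⟩ := pvFind_any fuel (pvFind fuel p e.1).1 s e.2 f1Inv
    (by rw [f1len]; exact he2) (by rw [f1len]; exact hmu2)
  rw [f1len] at f2v
  have hf2v : (pvFind fuel (pvFind fuel p e.1).1 e.2).2 = pvRoot p v := by
    rw [f2v, ← hv, f1roots v hvR]
  have hf1v : (pvFind fuel p e.1).2 = pvRoot p u := f1v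
  rw [f1len] at f2roots f2len
  have hroots2 : ∀ z, pvInR p.length z →
      pvRoot (pvFind fuel (pvFind fuel p e.1).1 e.2).1 z = pvRoot p z := by
    intro z hz
    rw [f2roots z hz, f1roots z hz]
  -- B side: the two label reads
  have hlu : (PySem.List.pyGet? l e.1).getD 0 = pvIdx l u := by
    by_cases h : e.1 < 0
    · rw [pvGet_neg l e.1 (by omega) h, hu]
      simp only [pvWrap, if_pos h, hllen]
    · rw [pvGet_pos l e.1 (by omega) (by omega), hu]
      simp only [pvWrap, if_neg h]
  have hlv : (PySem.List.pyGet? l e.2).getD 0 = pvIdx l v := by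
    by_cases h : e.2 < 0
    · rw [pvGet_neg l e.2 (by omega) h, hv]
      simp only [pvWrap, if_pos h, hllen]
    · rw [pvGet_pos l e.2 (by omega) (by omega), hv]
      simp only [pvWrap, if_neg h]
  have hbranch : (pvIdx l u = pvIdx l v) ↔ (pvRoot p u = pvRoot p v) := hCR u v huR hvR
  by_cases hsame : pvRoot p u = pvRoot p v
  · -- redundant edge
    refine ⟨(pvFind fuel (pvFind fuel p e.1).1 e.2).1, s, l, c, r + 1, ?_, ?_, f2len, rfl,
      f2Inv, by rw [f2len]; exact hllen, ?_⟩
    · show pvStepA fuel (p, s, c, r) e = _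
      simp only [pvStepA, pvUnion]
      rw [hf1v, hf2v, if_pos hsame]
      simp
    · show pvStepB (l, c, r) e = _
      simp only [pvStepB]
      rw [hlu, hlv, if_pos (hbranch.2 hsame)]
    · intro a b ha hb
      rw [f2len] at ha hb
      rw [hroots2 a ha, hroots2 b hb]
      exact hCR a b ha hb
  · -- merging edge
    have hlne : pvIdx l u ≠ pvIdx l v := fun h => hsame (hbranch.1 h)
    have hrxR : pvInR p.length (pvRoot p u) := (pvRoot_props p s u hInv huR).1
    have hryR : pvInR p.length (pvRoot p v) := (pvRoot_props p s v hInv hvR).1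
    have hrxfix2 : pvIdx (pvFind fuel (pvFind fuel p e.1).1 e.2).1 (pvRoot p u) = pvRoot p u := by
      have h0 : pvRoot (pvFind fuel (pvFind fuel p e.1).1 e.2).1 (pvRoot p u) = pvRoot p u := by
        rw [hroots2 _ hrxR, pvRoot_root p _ (pvRoot_props p s u hInv huR).2.1]
      obtain ⟨a, b, c'⟩ := pvRoot_props _ s (pvRoot p u) f2Inv (pvInR_of_eq f2len hrxR)
      rw [h0] at b
      exact b
    have hryfix2 : pvIdx (pvFind fuel (pvFind fuel p e.1).1 e.2).1 (pvRoot p v) = pvRoot p v := by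
      have h0 : pvRoot (pvFind fuel (pvFind fuel p e.1).1 e.2).1 (pvRoot p v) = pvRoot p v := by
        rw [hroots2 _ hryR, pvRoot_root p _ (pvRoot_props p s v hInv hvR).2.1]
      obtain ⟨a, b, c'⟩ := pvRoot_props _ s (pvRoot p v) f2Inv (pvInR_of_eq f2len hryR)
      rw [h0] at b
      exact b
    have hsl := hInv.1
    have hsxE : (PySem.List.pyGet? s (pvRoot p u)).getD 0 = pvIdx s (pvRoot p u) :=
      pvGet_pos s _ hrxR.1 (by rw [hsl]; exact hrxR.2)
    have hsyE : (PySem.List.pyGet? s (pvRoot p v)).getD 0 = pvIdx s (pvRoot p v) :=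
      pvGet_pos s _ hryR.1 (by rw [hsl]; exact hryR.2)
    -- generic link step: a survives, b is absorbed
    have key : ∀ (a b : Int),
        (a = pvRoot p u ∧ b = pvRoot p v) ∨ (a = pvRoot p v ∧ b = pvRoot p u) →
        pvIdx s b ≤ pvIdx s a →
        pvRel ((pvFind fuel (pvFind fuel p e.1).1 e.2).1.set b.toNat a)
          (s.set a.toNat (pvIdx s a + pvIdx s b))
          (l.map fun t => if t = pvIdx l v then pvIdx l u else t) := by
      intro a b hab hle
      have haR : pvInR (pvFind fuel (pvFind fuel p e.1).1 e.2).1.length a := by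
        refine pvInR_of_eq f2len ?_
        rcases hab with ⟨h1, _⟩ | ⟨h1, _⟩ <;> subst h1
        · exact hrxR
        · exact hryR
      have hbR : pvInR (pvFind fuel (pvFind fuel p e.1).1 e.2).1.length b := by
        refine pvInR_of_eq f2len ?_
        rcases hab with ⟨_, h2⟩ | ⟨_, h2⟩ <;> subst h2
        · exact hryR
        · exact hrxR
      have hafix : pvIdx (pvFind fuel (pvFind fuel p e.1).1 e.2).1 a = a := by
        rcases hab with ⟨h1, _⟩ | ⟨h1, _⟩ <;> subst h1
        · exact hrxfix2
        · exact hryfix2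
      have hbfix : pvIdx (pvFind fuel (pvFind fuel p e.1).1 e.2).1 b = b := by
        rcases hab with ⟨_, h2⟩ | ⟨_, h2⟩ <;> subst h2
        · exact hryfix2
        · exact hrxfix2
      have habne : a ≠ b := by
        rcases hab with ⟨h1, h2⟩ | ⟨h1, h2⟩ <;> subst h1 <;> subst h2
        · exact hsame
        · exact fun h => hsame h.symm
      obtain ⟨linkInv, linkroots⟩ := pvLink (pvFind fuel (pvFind fuel p e.1).1 e.2).1 s a b
        f2Inv haR hbR hafix hbfix habne hle
      refine ⟨linkInv, by simp [f2len, hllen], ?_⟩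
      have hlen2 : ((pvFind fuel (pvFind fuel p e.1).1 e.2).1.set b.toNat a).length = p.length := by
        simp [f2len]
      intro z w hz hw
      rw [hlen2] at hz hw
      have eZ := linkroots z (pvInR_of_eq f2len hz)
      have eW := linkroots w (pvInR_of_eq f2len hw)
      rw [hroots2 z hz] at eZ
      rw [hroots2 w hw] at eW
      rw [eZ, eW, pvIdx_map_relabel l (pvIdx l u) (pvIdx l v) z (pvInR_of_eq hllen hz),
        pvIdx_map_relabel l (pvIdx l u) (pvIdx l v) w (pvInR_of_eq hllen hw),
        pvCollapse (pvIdx l z) (pvIdx l w) (pvIdx l u) (pvIdx l v) hlne,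
        pvCollapse (pvRoot p z) (pvRoot p w) a b habne]
      have hzw := hCR z w hz hw
      have hzu := hCR z u hz huR
      have hzv := hCR z v hz hvR
      have hwu := hCR w u hw huR
      have hwv := hCR w v hw hvR
      rcases hab with ⟨h1, h2⟩ | ⟨h1, h2⟩
      · rw [h1, h2]
        exact pvMergeIff _ _ _ _ _ _ _ _ hzw hzu hzv hwu hwv
      · rw [h1, h2]
        exact pvMergeIff' _ _ _ _ _ _ _ _ hzw hzu hzv hwu hwv
    -- now the two result states, depending on the size comparison
    by_cases hsw : pvIdx s (pvRoot p u) < pvIdx s (pvRoot p v)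
    · refine ⟨(pvFind fuel (pvFind fuel p e.1).1 e.2).1.set (pvRoot p u).toNat (pvRoot p v),
        s.set (pvRoot p v).toNat (pvIdx s (pvRoot p v) + pvIdx s (pvRoot p u)),
        l.map (fun t => if t = pvIdx l v then pvIdx l u else t), c - 1, r, ?_, ?_, ?_, by simp, ?_⟩
      · show pvStepA fuel (p, s, c, r) e = _
        simp only [pvStepA, pvUnion]
        rw [hf1v, hf2v, if_neg hsame, hsxE, hsyE, if_pos hsw]
        rw [pvSet_pos _ (pvRoot p u) (pvRoot p v) hrxR.1 (by rw [f2len]; exact hrxR.2),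
          pvSet_pos s (pvRoot p v) _ hryR.1 (by rw [hsl]; exact hryR.2), hsxE, hsyE]
        simp
      · show pvStepB (l, c, r) e = _
        simp only [pvStepB]
        rw [hlu, hlv, if_neg hlne]
      · simp [f2len]
      · exact key (pvRoot p v) (pvRoot p u) (Or.inr ⟨rfl, rfl⟩) (le_of_lt hsw)
    · refine ⟨(pvFind fuel (pvFind fuel p e.1).1 e.2).1.set (pvRoot p v).toNat (pvRoot p u),
        s.set (pvRoot p u).toNat (pvIdx s (pvRoot p u) + pvIdx s (pvRoot p v)),
        l.map (fun t => if t = pvIdx l v then pvIdx l u else t), c - 1, r, ?_, ?_, ?_, by simp, ?_⟩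
      · show pvStepA fuel (p, s, c, r) e = _
        simp only [pvStepA, pvUnion]
        rw [hf1v, hf2v, if_neg hsame, hsxE, hsyE, if_neg hsw]
        rw [pvSet_pos _ (pvRoot p v) (pvRoot p u) hryR.1 (by rw [f2len]; exact hryR.2),
          pvSet_pos s (pvRoot p u) _ hrxR.1 (by rw [hsl]; exact hrxR.2), hsxE, hsyE]
        simp
      · show pvStepB (l, c, r) e = _
        simp only [pvStepB]
        rw [hlu, hlv, if_neg hlne]
      · simp [f2len]
      · exact key (pvRoot p u) (pvRoot p v) (Or.inl ⟨rfl, rfl⟩) (by omega)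

lemma pvLoop : ∀ (es : List (Int × Int)) (fuel : Nat) (p s l : List Int) (c r : Int),
    pvRel p s l → s.length ≤ fuel →
    (∀ e ∈ es, -(p.length : Int) ≤ e.1 ∧ e.1 < (p.length : Int) ∧
      -(p.length : Int) ≤ e.2 ∧ e.2 < (p.length : Int)) →
    (es.foldl (pvStepA fuel) (p, s, c, r)).2.2 = (es.foldl pvStepB (l, c, r)).2 := by
  intro es
  induction es with
  | nil => intro fuel p s l c r _ _ _; rfl
  | cons e es ih =>
    intro fuel p s l c r hRel hf hb
    obtain ⟨hb1, hb2, hb3, hb4⟩ := hb e (List.mem_cons_self)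
    obtain ⟨p', s', l', c', r', hA, hB, hplen, hslen, hRel'⟩ :=
      pvStep_rel fuel p s l c r e hRel hf ⟨hb1, hb2⟩ ⟨hb3, hb4⟩
    rw [List.foldl_cons, List.foldl_cons, hA, hB]
    refine ih fuel p' s' l' c' r' hRel' (by rw [hslen]; exact hf) ?_
    intro e' he'
    rw [hplen]
    exact hb e' (List.mem_cons_of_mem e he')

-- ----- the initial states -----

lemma pvIdx_pyRange (V : Int) (x : Int) (hx : pvInR (PySem.List.pyRange 0 V 1).length x) :
    pvIdx (PySem.List.pyRange 0 V 1) x = x := by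
  obtain ⟨h0, h1⟩ := hx
  have hk : x.toNat < (PySem.List.pyRange 0 V 1).length := by omega
  rw [pvIdx, List.getD_eq_getElem?_getD, List.getElem?_eq_getElem hk]
  rw [PySem.List.getElem_pyRange_one]
  simp
  omega

lemma pvIdx_replicate (n : Nat) (x : Int) (hx : x.toNat < n) :
    pvIdx (List.replicate n (1 : Int)) x = 1 := by
  simp [pvIdx, List.getD_eq_getElem?_getD, List.getElem?_replicate, hx]

lemma pvRel_init (V : Int) :
    pvRel (PySem.List.pyRange 0 V 1) (List.replicate V.toNat (1 : Int))
      (PySem.List.pyRange 0 V 1) := by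
  have hlen : (PySem.List.pyRange 0 V 1).length = V.toNat := by
    simp [PySem.List.length_pyRange_one]
  have hInv : pvInvA (PySem.List.pyRange 0 V 1) (List.replicate V.toNat (1 : Int)) := by
    constructor
    · simp [hlen]
    · intro x hx
      have he := pvIdx_pyRange V x hx
      refine ⟨by rw [he]; exact hx, ?_, Or.inl he⟩
      rw [pvIdx_replicate V.toNat x (by rw [← hlen]; obtain ⟨h0, h1⟩ := hx; omega)]
  refine ⟨hInv, rfl, ?_⟩
  intro a b ha hb
  rw [pvIdx_pyRange V a ha, pvIdx_pyRange V b hb,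
    pvRoot_root _ a (pvIdx_pyRange V a ha), pvRoot_root _ b (pvIdx_pyRange V b hb)]

-- ===== VERDICT (by name: the statement is the Claim_ definition above) =====
theorem minConnect_spec : Claim_equal_minConnect := by
  intro V edges hDom hPre
  show minConnect V edges = minConnect_alt V edges
  cases edges with
  | nil => rfl
  | cons e es =>
    obtain ⟨hb1, hb2, hb3, hb4⟩ := hPre e (List.mem_cons_self)
    have hV : 0 < V := by omega
    have hlen : (PySem.List.pyRange 0 V 1).length = V.toNat := by
      simp [PySem.List.length_pyRange_one]
    have hbnd : ∀ e' ∈ (e :: es),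
        -((PySem.List.pyRange 0 V 1).length : Int) ≤ e'.1 ∧
          e'.1 < ((PySem.List.pyRange 0 V 1).length : Int) ∧
          -((PySem.List.pyRange 0 V 1).length : Int) ≤ e'.2 ∧
          e'.2 < ((PySem.List.pyRange 0 V 1).length : Int) := by
      intro e' he'
      obtain ⟨c1, c2, c3, c4⟩ := hPre e' he'
      rw [hlen]
      omega
    have hloop := pvLoop (e :: es) V.toNat (PySem.List.pyRange 0 V 1)
      (List.replicate V.toNat (1 : Int)) (PySem.List.pyRange 0 V 1) V 0 (pvRel_init V)
      (by simp) hbnd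
    simp only [minConnect, minConnect_alt]
    rw [hloop]
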